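-- pv_equiv track=rewrite | github.com/tmdgh1592/PROBLEM_SOLVE | Corp/SKT/1.py | solution
-- ===== SOURCE A (Python) =====
-- def solution(p):
--     answer = [0 for _ in range(len(p))]
--     for i in range(len(p)):
--         min_idx = i
--         for j in range(i+1, len(p)):
--             if p[min_idx] > p[j]:
--                 min_idx = j
--
--         if min_idx != i:
--             p[i], p[min_idx] = p[min_idx], p[i]  # swap
--             answer[i] += 1
--             answer[min_idx] += 1
--
--     return answer
-- ===== SOURCE B (Python) =====
-- def _best(t):
--     # (min value, leftmost index) represented by node t
--     if t[0] == 'leaf':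
--         return (t[2], t[1])
--     return t[1]
--
--
-- def _better(a, b):
--     # a comes from the segment to the left of b: keep a on ties (leftmost minimum)
--     return a if a[0] <= b[0] else b
--
--
-- def _build(p, l, r):
--     # segment tree over positions [l, r)
--     if r - l <= 1:
--         return ('leaf', l, p[l])
--     m = (l + r) // 2
--     left = _build(p, l, m)
--     right = _build(p, m, r)
--     return ('node', _better(_best(left), _best(right)), left, right)
--
--
-- def _query(t, l, r, ql):
--     # (min value, leftmost index) over positions [ql, r), assuming l <= ql < r
--     if t[0] == 'leaf':
--         return (t[2], t[1])
--     if ql <= l: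
--         return t[1]
--     m = (l + r) // 2
--     if ql >= m:
--         return _query(t[3], m, r, ql)
--     return _better(_query(t[2], l, m, ql), _best(t[3]))
--
--
-- def _update(t, l, r, pos, v):
--     # path-copying point update: position pos gets value v
--     if t[0] == 'leaf':
--         return ('leaf', t[1], v)
--     m = (l + r) // 2
--     if pos < m:
--         nl = _update(t[2], l, m, pos, v)
--         return ('node', _better(_best(nl), _best(t[3])), nl, t[3])
--     nr = _update(t[3], m, r, pos, v)
--     return ('node', _better(_best(t[2]), _best(nr)), t[2], nr)
--
--
-- def solution(p):
--     n = len(p)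
--     answer = [0] * n
--     if n == 0:
--         return answer
--     q = list(p)
--     t = _build(q, 0, n)
--     for i in range(n):
--         _, j = _query(t, 0, n, i)
--         if j != i:
--             vi, vj = q[i], q[j]
--             q[i], q[j] = vj, vi
--             t = _update(t, 0, n, i, vj)
--             t = _update(t, 0, n, j, vi)
--             answer[i] += 1
--             answer[j] += 1
--     return answer
-- ===== Notes on version B (the rewrite author's own statement) =====
-- stated objective: faster
-- what changed: B replaces A's O(n) inner argmin scan by a (min value, leftmost index) segment tree with point updates after each swap, making the simulation O(n log n) instead of O(n^2).
import Mathlib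
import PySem

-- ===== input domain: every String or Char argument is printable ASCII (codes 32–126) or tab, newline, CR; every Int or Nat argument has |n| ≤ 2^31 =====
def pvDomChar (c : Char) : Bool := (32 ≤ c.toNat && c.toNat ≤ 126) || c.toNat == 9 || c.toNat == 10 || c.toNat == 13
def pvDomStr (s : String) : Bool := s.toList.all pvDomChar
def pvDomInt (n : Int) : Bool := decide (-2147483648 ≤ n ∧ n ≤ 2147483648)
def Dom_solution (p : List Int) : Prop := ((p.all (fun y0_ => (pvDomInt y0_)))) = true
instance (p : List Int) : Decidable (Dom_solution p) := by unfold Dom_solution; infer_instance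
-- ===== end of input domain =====

-- B replaces A's O(n) inner argmin scan by a (min value, leftmost index) segment tree with
-- point updates after each swap, so the same swap simulation runs in O(n log n) (objective:
-- faster). A mutates its argument in place, B swaps only on a local copy: the equivalence
-- proved here is about the RETURN value only.

-- ===== PORT A =====
-- one iteration of A's outer loop; state = (p, answer)
def solutionStep (s : List Int × List Int) (i : Int) : List Int × List Int :=
  let p := s.1
  let answer := s.2
  -- inner 'for j in range(i+1, len(p)): if p[min_idx] > p[j]: min_idx = j'
  let m := (PySem.List.pyRange (i+1) (p.length : Int)).foldl
      (fun m j => if PySem.List.pyGetD p m 0 > PySem.List.pyGetD p j 0 then j else m) i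
  if m ≠ i then
    -- p[i], p[min_idx] = p[min_idx], p[i]  (indices come from range(len(p)), hence in range:
    -- .toNat/.set is exact here)
    let pi := PySem.List.pyGetD p i 0
    let pm := PySem.List.pyGetD p m 0
    let p' := (p.set i.toNat pm).set m.toNat pi
    -- answer[i] += 1; answer[min_idx] += 1
    let a1 := answer.set i.toNat (PySem.List.pyGetD answer i 0 + 1)
    let a2 := a1.set m.toNat (PySem.List.pyGetD a1 m 0 + 1)
    (p', a2)
  else s

def solution (p : List Int) : List Int :=
  let answer := (PySem.List.pyRange 0 (p.length : Int)).map (fun _ => (0:Int))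
  ((PySem.List.pyRange 0 (p.length : Int)).foldl solutionStep (p, answer)).2

-- ===== PORT B =====
-- segment tree node: 'leaf idx v' or 'node best left right', best = (min value, leftmost index)
inductive Seg where
  | leaf : Int → Int → Seg
  | node : Int × Int → Seg → Seg → Seg
deriving Repr, DecidableEq

-- _best
def segBest : Seg → Int × Int
  | .leaf i v => (v, i)
  | .node b _ _ => b

-- _better: a is from the segment to the left of b, keep a on ties (leftmost minimum)
def segBetter (a b : Int × Int) : Int × Int := if a.1 ≤ b.1 then a else b

-- _build (recursion on the segment length, as in the Python)
def segBuild (p : List Int) (l r : Int) : Seg :=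
  if _h : r - l ≤ 1 then .leaf l (PySem.List.pyGetD p l 0)
  else
    let m := PySem.Int.floordiv (l + r) 2
    let left := segBuild p l m
    let right := segBuild p m r
    .node (segBetter (segBest left) (segBest right)) left right
termination_by (r - l).toNat
decreasing_by
  all_goals
    have h1 : l + 1 ≤ PySem.Int.floordiv (l + r) 2 :=
      (PySem.Int.le_floordiv_iff_mul_le (by omega)).mpr (by omega)
    have h2 : PySem.Int.floordiv (l + r) 2 < r :=
      (PySem.Int.floordiv_lt_iff_lt_mul (by omega)).mpr (by omega)
    omega

-- _query: (min value, leftmost index) over [ql, r)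
def segQuery : Seg → Int → Int → Int → Int × Int
  | .leaf i v, _, _, _ => (v, i)
  | .node b tl tr, l, r, ql =>
    if ql ≤ l then b
    else
      let m := PySem.Int.floordiv (l + r) 2
      if ql ≥ m then segQuery tr m r ql
      else segBetter (segQuery tl l m ql) (segBest tr)

-- _update: path-copying point update
def segUpdate : Seg → Int → Int → Int → Int → Seg
  | .leaf i _, _, _, _, v => .leaf i v
  | .node _ tl tr, l, r, pos, v =>
    let m := PySem.Int.floordiv (l + r) 2
    if pos < m then
      let nl := segUpdate tl l m pos v
      .node (segBetter (segBest nl) (segBest tr)) nl tr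
    else
      let nr := segUpdate tr m r pos v
      .node (segBetter (segBest tl) (segBest nr)) tl nr

-- one iteration of B's main loop; state = (q, t, answer)
def solutionAltStep (n : Int) (s : List Int × Seg × List Int) (i : Int) :
    List Int × Seg × List Int :=
  let q := s.1
  let t := s.2.1
  let answer := s.2.2
  let j := (segQuery t 0 n i).2
  if j ≠ i then
    let vi := PySem.List.pyGetD q i 0
    let vj := PySem.List.pyGetD q j 0
    let q' := (q.set i.toNat vj).set j.toNat vi
    let t' := segUpdate (segUpdate t 0 n i vj) 0 n j vi
    let a1 := answer.set i.toNat (PySem.List.pyGetD answer i 0 + 1)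
    let a2 := a1.set j.toNat (PySem.List.pyGetD a1 j 0 + 1)
    (q', t', a2)
  else s

def solution_alt (p : List Int) : List Int :=
  let n : Int := (p.length : Int)
  let answer := PySem.List.pyRepeat [0] n
  if n == 0 then answer
  else
    let t := segBuild p 0 n
    ((PySem.List.pyRange 0 n).foldl (solutionAltStep n) (p, t, answer)).2.2

-- ===== PRECONDITION & SPEC =====
def Spec_solution (p : List Int) (out : List Int) : Prop := out = solution_alt p
instance (p : List Int) (out : List Int) : Decidable (Spec_solution p out) := by unfold Spec_solution; infer_instance

-- ===== CLAIM (what is proved, stated in full; the proofs are below) =====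
def Claim_equal_solution : Prop := ∀ (p : List Int), Dom_solution p → Spec_solution p (solution p)

-- ===== LEMMAS AND PROOFS =====

-- (value, index) pairs of a list whose first element sits at absolute position l
def pvPairs (l : Int) : List Int → List (Int × Int)
  | [] => []
  | x :: xs => (x, l) :: pvPairs (l + 1) xs

-- first minimum (leftmost on ties) of the pair list, 'xs' to the right of seed 'a'
def pvListBest (a : Int × Int) (xs : List (Int × Int)) : Int × Int := xs.foldl segBetter a

-- first minimum of the values of xs placed at positions l, l+1, …
def pvBestOf (l : Int) (xs : List Int) : Int × Int :=
  match xs with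
  | [] => (0, 0)
  | x :: rest => pvListBest (x, l) (pvPairs (l + 1) rest)

-- 't represents the value list xs on positions [l, r)'
def pvModels : Seg → Int → Int → List Int → Prop
  | .leaf i v, l, r, xs => i = l ∧ r = l + 1 ∧ xs = [v]
  | .node b tl tr, l, r, xs =>
    ∃ ys zs, xs = ys ++ zs ∧
      pvModels tl l (PySem.Int.floordiv (l + r) 2) ys ∧
      pvModels tr (PySem.Int.floordiv (l + r) 2) r zs ∧
      b = segBetter (segBest tl) (segBest tr) ∧ l + 2 ≤ r

lemma pvModels_length : ∀ (t : Seg) (l r : Int) (xs : List Int),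
    pvModels t l r xs → l < r ∧ (xs.length : Int) = r - l := by
  intro t
  induction t with
  | leaf i v =>
      intro l r xs h
      obtain ⟨_, h2, h3⟩ := h
      subst h3; simp; omega
  | node b tl tr ihl ihr =>
      intro l r xs h
      obtain ⟨ys, zs, hx, hl, hr, _, h2⟩ := h
      obtain ⟨hl1, hl2⟩ := ihl _ _ _ hl
      obtain ⟨hr1, hr2⟩ := ihr _ _ _ hr
      subst hx; simp; omega

lemma segBetter_assoc (a b c : Int × Int) :
    segBetter (segBetter a b) c = segBetter a (segBetter b c) := by
  simp only [segBetter]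
  split_ifs <;> first | rfl | omega

lemma foldl_segBetter_shift : ∀ (zs : List (Int × Int)) (u z : Int × Int),
    (z :: zs).foldl segBetter u = segBetter u (zs.foldl segBetter z) := by
  intro zs
  induction zs with
  | nil => intro u z; rfl
  | cons w zs ih =>
      intro u z
      show (w :: zs).foldl segBetter (segBetter u z) = _
      rw [ih, ih, segBetter_assoc]

lemma pvListBest_append (a : Int × Int) (xs : List (Int × Int)) (z : Int × Int)
    (zs : List (Int × Int)) :
    pvListBest a (xs ++ z :: zs) = segBetter (pvListBest a xs) (pvListBest z zs) := by
  simp only [pvListBest, List.foldl_append]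
  exact foldl_segBetter_shift zs _ z

lemma pvPairs_append : ∀ (xs ys : List Int) (l : Int),
    pvPairs l (xs ++ ys) = pvPairs l xs ++ pvPairs (l + xs.length) ys := by
  intro xs
  induction xs with
  | nil => intro ys l; simp [pvPairs]
  | cons x xs ih =>
      intro ys l
      simp only [List.cons_append, pvPairs, ih, List.length_cons]
      congr 2
      push_cast; ring

lemma pvBestOf_append (l : Int) (xs ys : List Int) (hx : xs ≠ []) (hy : ys ≠ []) :
    pvBestOf l (xs ++ ys) = segBetter (pvBestOf l xs) (pvBestOf (l + xs.length) ys) := by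
  obtain ⟨x, xs', rfl⟩ := List.exists_cons_of_ne_nil hx
  obtain ⟨y, ys', rfl⟩ := List.exists_cons_of_ne_nil hy
  simp only [pvBestOf, List.cons_append, pvPairs_append, pvPairs, List.length_cons]
  rw [pvListBest_append]
  congr 2
  · exact congrArg (Prod.mk y) (by push_cast; ring)
  · exact congrArg (fun z => pvPairs z ys') (by push_cast; ring)

lemma pvBest_spec : ∀ (t : Seg) (l r : Int) (xs : List Int),
    pvModels t l r xs → segBest t = pvBestOf l xs := by
  intro t
  induction t with
  | leaf i v =>
      intro l r xs h
      obtain ⟨h1, h2, h3⟩ := h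
      subst h1 h3
      rfl
  | node b tl tr ihl ihr =>
      intro l r xs h
      obtain ⟨ys, zs, hx, hl, hr, hb, h2⟩ := h
      obtain ⟨hl1, hl2⟩ := pvModels_length _ _ _ _ hl
      obtain ⟨hr1, hr2⟩ := pvModels_length _ _ _ _ hr
      subst hx
      have hyne : ys ≠ [] := by
        intro h; subst h; simp at hl2; omega
      have hzne : zs ≠ [] := by
        intro h; subst h; simp at hr2; omega
      rw [show segBest (Seg.node b tl tr) = b from rfl, hb, ihl _ _ _ hl, ihr _ _ _ hr,
        pvBestOf_append l ys zs hyne hzne]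
      congr 2
      omega

lemma pvQuery_spec : ∀ (t : Seg) (l r ql : Int) (xs : List Int),
    pvModels t l r xs → l ≤ ql → ql < r →
    segQuery t l r ql = pvBestOf ql (xs.drop (ql - l).toNat) := by
  intro t
  induction t with
  | leaf i v =>
      intro l r ql xs h hq1 hq2
      obtain ⟨h1, h2, h3⟩ := h
      subst h1 h3
      have : ql = i := by omega
      subst this
      simp only [segQuery, sub_self, Int.toNat_zero, List.drop_zero]
      rfl
  | node b tl tr ihl ihr =>
      intro l r ql xs h hq1 hq2
      have hmod := h
      obtain ⟨ys, zs, hx, hl, hr, hb, h2⟩ := h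
      obtain ⟨hl1, hl2⟩ := pvModels_length _ _ _ _ hl
      obtain ⟨hr1, hr2⟩ := pvModels_length _ _ _ _ hr
      subst hx
      simp only [segQuery]
      by_cases hc1 : ql ≤ l
      · have : ql = l := by omega
        subst this
        rw [if_pos le_rfl]
        simp only [sub_self, Int.toNat_zero, List.drop_zero]
        exact pvBest_spec _ _ _ _ hmod
      · rw [if_neg hc1]
        by_cases hc2 : ql ≥ PySem.Int.floordiv (l + r) 2
        · rw [if_pos hc2]
          rw [ihr _ _ _ _ hr hc2 hq2]
          congr 1
          have hk : (ql - l).toNat = ys.length + (ql - PySem.Int.floordiv (l + r) 2).toNat := by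
            omega
          rw [hk, List.drop_length_add_append]
        · rw [if_neg hc2]
          push_neg at hc2
          rw [ihl _ _ _ _ hl (by omega) hc2, pvBest_spec _ _ _ _ hr]
          have hdrop : (ys ++ zs).drop (ql - l).toNat
              = ys.drop (ql - l).toNat ++ zs := by
            rw [List.drop_append]
            have : (ql - l).toNat - ys.length = 0 := by omega
            rw [this, List.drop_zero]
          rw [hdrop, pvBestOf_append ql (ys.drop (ql - l).toNat) zs
            (by intro hh
                have := congrArg List.length hh
                simp at this
                omega)
            (by intro hh; subst hh; simp at hr2; omega)]
          congr 2
          have : ((ys.drop (ql - l).toNat).length : Int)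
              = (ys.length : Int) - (ql - l) := by
            simp [List.length_drop]
            omega
          omega

lemma pvUpdate_spec : ∀ (t : Seg) (l r pos v : Int) (xs : List Int),
    pvModels t l r xs → l ≤ pos → pos < r →
    pvModels (segUpdate t l r pos v) l r (xs.set (pos - l).toNat v) := by
  intro t
  induction t with
  | leaf i w =>
      intro l r pos v xs h hp1 hp2
      obtain ⟨h1, h2, h3⟩ := h
      subst h1 h3
      have : pos = i := by omega
      subst this
      simp only [segUpdate, sub_self, Int.toNat_zero, List.set]
      exact ⟨rfl, h2, rfl⟩
  | node b tl tr ihl ihr =>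
      intro l r pos v xs h hp1 hp2
      obtain ⟨ys, zs, hx, hl, hr, hb, h2⟩ := h
      obtain ⟨hl1, hl2⟩ := pvModels_length _ _ _ _ hl
      obtain ⟨hr1, hr2⟩ := pvModels_length _ _ _ _ hr
      subst hx
      simp only [segUpdate]
      by_cases hc : pos < PySem.Int.floordiv (l + r) 2
      · rw [if_pos hc]
        refine ⟨ys.set (pos - l).toNat v, zs, ?_, ihl _ _ _ _ _ hl hp1 hc, hr, rfl, h2⟩
        rw [List.set_append_left]
        omega
      · rw [if_neg hc]
        push_neg at hc
        refine ⟨ys, zs.set (pos - PySem.Int.floordiv (l + r) 2).toNat v, ?_,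
          hl, ihr _ _ _ _ _ hr hc hp2, rfl, h2⟩
        have he : (pos - l).toNat - ys.length
            = (pos - PySem.Int.floordiv (l + r) 2).toNat := by omega
        rw [List.set_append_right _ _ (by omega), he]

lemma pvBuild_models (p : List Int) : ∀ (k : Nat) (l r : Int), (r - l).toNat ≤ k → l < r →
    pvModels (segBuild p l r) l r
      ((PySem.List.pyRange l r 1).map (fun j => PySem.List.pyGetD p j 0)) := by
  intro k
  induction k with
  | zero => intro l r hk hlr; omega
  | succ k ih =>
      intro l r hk hlr
      rw [segBuild]
      by_cases hle : r - l ≤ 1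
      · have : r = l + 1 := by omega
        subst this
        rw [dif_pos hle, PySem.List.pyRange_one_singleton]
        exact ⟨rfl, rfl, rfl⟩
      · rw [dif_neg hle]
        have h1 : l + 1 ≤ PySem.Int.floordiv (l + r) 2 :=
          (PySem.Int.le_floordiv_iff_mul_le (by omega)).mpr (by omega)
        have h2 : PySem.Int.floordiv (l + r) 2 < r :=
          (PySem.Int.floordiv_lt_iff_lt_mul (by omega)).mpr (by omega)
        rw [PySem.List.pyRange_one_append l (PySem.Int.floordiv (l + r) 2) r
          (by omega) (by omega), List.map_append]
        exact ⟨_, _, rfl, ih l _ (by omega) (by omega), ih _ r (by omega) (by omega),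
          rfl, by omega⟩

-- a segBetter-fold returns its seed or a list element
lemma foldl_segBetter_mem : ∀ (xs : List (Int × Int)) (a : Int × Int),
    xs.foldl segBetter a = a ∨ xs.foldl segBetter a ∈ xs := by
  intro xs
  induction xs with
  | nil => intro a; left; rfl
  | cons x xs ih =>
      intro a
      rw [List.foldl_cons]
      rcases ih (segBetter a x) with h | h
      · rw [h]
        by_cases hc : a.1 ≤ x.1
        · left; simp [segBetter, hc]
        · right; simp [segBetter, hc]
      · right; exact List.mem_cons_of_mem _ h

lemma pvPairs_snd_bounds : ∀ (xs : List Int) (a : Int) (pr : Int × Int),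
    pr ∈ pvPairs a xs → a ≤ pr.2 ∧ pr.2 < a + xs.length := by
  intro xs
  induction xs with
  | nil => intro a pr h; simp [pvPairs] at h
  | cons x xs ih =>
      intro a pr h
      rw [pvPairs, List.mem_cons] at h
      rcases h with h | h
      · subst h; simp
      · have := ih (a + 1) pr h
        simp only [List.length_cons]
        push_cast
        omega

-- membership bound for the index returned by pvBestOf
lemma pvBestOf_snd_bounds (l : Int) (xs : List Int) (hx : xs ≠ []) :
    l ≤ (pvBestOf l xs).2 ∧ (pvBestOf l xs).2 < l + xs.length := by
  obtain ⟨x, rest, rfl⟩ := List.exists_cons_of_ne_nil hx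
  simp only [pvBestOf, pvListBest]
  rcases foldl_segBetter_mem (pvPairs (l + 1) rest) (x, l) with h | h
  · rw [h]; simp
  · have := pvPairs_snd_bounds rest (l + 1) _ h
    simp only [List.length_cons]
    push_cast
    omega

-- tracking the value alongside the index: B's pair fold projects to A's index fold
lemma pvAfold_gen (q : List Int) : ∀ (js : List Int) (m : Int),
    js.foldl (fun a j => segBetter a (PySem.List.pyGetD q j 0, j))
        (PySem.List.pyGetD q m 0, m)
      = (PySem.List.pyGetD q (js.foldl
            (fun m j => if PySem.List.pyGetD q m 0 > PySem.List.pyGetD q j 0 then j else m) m) 0,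
         js.foldl
            (fun m j => if PySem.List.pyGetD q m 0 > PySem.List.pyGetD q j 0 then j else m) m) := by
  intro js
  induction js with
  | nil => intro m; rfl
  | cons j js ih =>
      intro m
      simp only [List.foldl_cons]
      by_cases h : PySem.List.pyGetD q m 0 > PySem.List.pyGetD q j 0
      · rw [if_pos h, show segBetter (PySem.List.pyGetD q m 0, m) (PySem.List.pyGetD q j 0, j)
            = (PySem.List.pyGetD q j 0, j) from by
          simp only [segBetter]; rw [if_neg (by omega)]]
        exact ih j
      · rw [if_neg h, show segBetter (PySem.List.pyGetD q m 0, m) (PySem.List.pyGetD q j 0, j)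
            = (PySem.List.pyGetD q m 0, m) from by
          simp only [segBetter]; rw [if_pos (by omega)]]
        exact ih m

-- the pair list of a suffix of q is the index range paired with lookups
lemma pvPairs_range (q : List Int) : ∀ (n : Nat) (a : Int), 0 ≤ a →
    q.length - a.toNat ≤ n →
    pvPairs a (q.drop a.toNat)
      = (PySem.List.pyRange a (q.length : Int) 1).map
          (fun j => (PySem.List.pyGetD q j 0, j)) := by
  intro n
  induction n with
  | zero =>
      intro a h0 hn
      have hge : (q.length : Int) ≤ a := by omega
      rw [List.drop_of_length_le (by omega), PySem.List.pyRange_one_eq_nil hge]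
      rfl
  | succ n ih =>
      intro a h0 hn
      by_cases hlt : a < (q.length : Int)
      · have hna : a.toNat < q.length := by omega
        rw [List.drop_eq_getElem_cons hna, PySem.List.pyRange_one_cons hlt, List.map_cons,
          pvPairs]
        have hx : (PySem.List.pyGetD q a 0, a) = ((q[a.toNat] : Int), a) := by
          rw [PySem.List.pyGetD_eq_getElem q 0 h0 hlt]
        rw [← hx]
        congr 1
        have := ih (a + 1) (by omega) (by omega)
        rwa [show (a + 1).toNat = a.toNat + 1 from by omega] at this
      · have hge : (q.length : Int) ≤ a := by omega
        rw [List.drop_of_length_le (by omega), PySem.List.pyRange_one_eq_nil hge]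
        rfl

-- A's inner argmin fold equals the index component of pvBestOf on the suffix
lemma pvAfold_eq (q : List Int) (i : Int) (h0 : 0 ≤ i) (h1 : i < (q.length : Int)) :
    (PySem.List.pyRange (i+1) (q.length : Int) 1).foldl
        (fun m j => if PySem.List.pyGetD q m 0 > PySem.List.pyGetD q j 0 then j else m) i
      = (pvBestOf i (q.drop i.toNat)).2 := by
  have hna : i.toNat < q.length := by omega
  rw [show q.drop i.toNat = q[i.toNat] :: q.drop (i.toNat + 1) from
    List.drop_eq_getElem_cons hna]
  simp only [pvBestOf, pvListBest]
  have hp : pvPairs (i + 1) (q.drop (i.toNat + 1))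
      = (PySem.List.pyRange (i+1) (q.length : Int) 1).map
          (fun j => (PySem.List.pyGetD q j 0, j)) := by
    have := pvPairs_range q q.length (i + 1) (by omega) (by omega)
    rwa [show (i + 1).toNat = i.toNat + 1 from by omega] at this
  rw [hp, List.foldl_map,
    show ((q[i.toNat] : Int), i) = (PySem.List.pyGetD q i 0, i) from by
      rw [PySem.List.pyGetD_eq_getElem q 0 h0 h1],
    pvAfold_gen q _ i]

-- joint loop invariant: same array, same answers, tree models the array
lemma pvLoop_inv (n : Nat) : ∀ (L : List Int) (q ans : List Int) (t : Seg),
    q.length = n → (∀ i ∈ L, 0 ≤ i ∧ i < (n : Int)) → pvModels t 0 (n : Int) q →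
    L.foldl solutionStep (q, ans)
      = ((L.foldl (solutionAltStep (n : Int)) (q, t, ans)).1,
         (L.foldl (solutionAltStep (n : Int)) (q, t, ans)).2.2) := by
  intro L
  induction L with
  | nil => intro q ans t _ _ _; rfl
  | cons i L ih =>
      intro q ans t hlen hmem hmod
      obtain ⟨hi0, hi1⟩ := hmem i (by simp)
      have hlen' : (q.length : Int) = (n : Int) := by rw [hlen]
      have hdropne : q.drop i.toNat ≠ [] := by
        intro hh
        have := congrArg List.length hh
        simp at this
        omega
      -- the two argmin computations agree
      have hquery : segQuery t 0 (n : Int) i = pvBestOf i (q.drop i.toNat) := by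
        have := pvQuery_spec t 0 (n : Int) i q hmod hi0 hi1
        simpa using this
      have hafold : (PySem.List.pyRange (i+1) ((q.length : Int)) 1).foldl
          (fun m j => if PySem.List.pyGetD q m 0 > PySem.List.pyGetD q j 0 then j else m) i
          = (pvBestOf i (q.drop i.toNat)).2 :=
        pvAfold_eq q i hi0 (by omega)
      obtain ⟨hj0, hj1⟩ := pvBestOf_snd_bounds i (q.drop i.toNat) hdropne
      have hjlt : (pvBestOf i (q.drop i.toNat)).2 < (n : Int) := by
        have : ((q.drop i.toNat).length : Int) = (n : Int) - i := by
          simp [List.length_drop, hlen]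
          omega
        omega
      simp only [List.foldl_cons]
      set j := (pvBestOf i (q.drop i.toNat)).2 with hjdef
      have hstepA : solutionStep (q, ans) i
          = (if j ≠ i then
              ((q.set i.toNat (PySem.List.pyGetD q j 0)).set j.toNat (PySem.List.pyGetD q i 0),
               ((ans.set i.toNat (PySem.List.pyGetD ans i 0 + 1)).set j.toNat
                 (PySem.List.pyGetD (ans.set i.toNat (PySem.List.pyGetD ans i 0 + 1)) j 0 + 1)))
            else (q, ans)) := by
        simp only [solutionStep, hafold, ← hjdef]
      have hstepB : solutionAltStep (n : Int) (q, t, ans) i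
          = (if j ≠ i then
              ((q.set i.toNat (PySem.List.pyGetD q j 0)).set j.toNat (PySem.List.pyGetD q i 0),
               segUpdate (segUpdate t 0 (n : Int) i (PySem.List.pyGetD q j 0)) 0 (n : Int) j
                 (PySem.List.pyGetD q i 0),
               ((ans.set i.toNat (PySem.List.pyGetD ans i 0 + 1)).set j.toNat
                 (PySem.List.pyGetD (ans.set i.toNat (PySem.List.pyGetD ans i 0 + 1)) j 0 + 1)))
            else (q, t, ans)) := by
        simp only [solutionAltStep, hquery, ← hjdef]
      rw [hstepA, hstepB]
      by_cases hc : j ≠ i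
      · rw [if_pos hc, if_pos hc]
        have hq2len : ((q.set i.toNat (PySem.List.pyGetD q j 0)).set j.toNat
            (PySem.List.pyGetD q i 0)).length = n := by simp [hlen]
        have hmod1 := pvUpdate_spec t 0 (n : Int) i (PySem.List.pyGetD q j 0) q hmod hi0 hi1
        have hmod2 := pvUpdate_spec _ 0 (n : Int) j (PySem.List.pyGetD q i 0) _ hmod1 (by omega) hjlt
        simp only [sub_zero] at hmod1 hmod2
        exact ih _ _ _ hq2len (fun k hk => hmem k (by simp [hk])) hmod2
      · rw [if_neg hc, if_neg hc]
        exact ih _ _ _ hlen (fun k hk => hmem k (by simp [hk])) hmod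

-- A's initial answer list is [0] * n
lemma pvInit_answer (N : Nat) :
    (PySem.List.pyRange 0 (N : Int) 1).map (fun _ => (0:Int))
      = PySem.List.pyRepeat [0] (N : Int) := by
  rw [PySem.List.pyRange_zero_natCast, PySem.List.pyRepeat_singleton]
  simp [List.map_map, Function.comp_def]

-- ===== VERDICT (by name: the statement is the Claim_ definition above) =====
theorem solution_spec : Claim_equal_solution := by
  intro p _
  show solution p = solution_alt p
  by_cases hn : p.length = 0
  · have : p = [] := List.length_eq_zero_iff.mp hn
    subst this
    rfl
  · simp only [solution, solution_alt]
    rw [if_neg (by simp [hn]), pvInit_answer p.length]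
    have hmod : pvModels (segBuild p 0 (p.length : Int)) 0 (p.length : Int) p := by
      have h := pvBuild_models p p.length 0 (p.length : Int) (by omega) (by omega)
      rwa [PySem.List.map_pyGetD_pyRange_zero'] at h
    have h := pvLoop_inv p.length (PySem.List.pyRange 0 (p.length : Int) 1) p
      (PySem.List.pyRepeat [0] (p.length : Int)) (segBuild p 0 (p.length : Int)) rfl
      (fun i hi => by
        have := PySem.List.mem_pyRange_one.mp hi
        exact ⟨this.1, this.2⟩) hmod
    rw [h]
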